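-- pv_equiv track=rewrite | github.com/sepsh/advent-of-code-python | 2024/02_2/main.py | is_adjacent_difference_safe
-- ===== SOURCE A (Python) =====
-- def is_adjacent_difference_safe(
--     ls: list[int],
--     least_safe_difference: int,
--     most_safe_difference: int,
--     margin_for_error: int = 0,
-- ) -> bool:
--     if margin_for_error < 0:
--         return False
--     safe_range = range(least_safe_difference, most_safe_difference + 1)
--     for i in range(1, len(ls) - 1):
--         diff_prev = abs(ls[i - 1] - ls[i])
--         diff_next = abs(ls[i] - ls[i + 1])
--         if not all((diff in safe_range) for diff in (diff_prev, diff_next)):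
--             return is_adjacent_difference_safe(
--                 ls=ls[:i] + ls[i + 1 :],
--                 least_safe_difference=least_safe_difference,
--                 most_safe_difference=most_safe_difference,
--                 margin_for_error=margin_for_error - 1,
--             )
--     return True
-- ===== SOURCE B (Python) =====
-- def is_adjacent_difference_safe(
--     ls: list[int],
--     least_safe_difference: int,
--     most_safe_difference: int,
--     margin_for_error: int = 0,
-- ) -> bool:
--     cur = list(ls)
--     while margin_for_error >= 0:
--         for i, (a, b, c) in enumerate(zip(cur, cur[1:], cur[2:]), start=1):
--             if not (least_safe_difference <= abs(a - b) <= most_safe_difference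
--                     and least_safe_difference <= abs(b - c) <= most_safe_difference):
--                 del cur[i]
--                 margin_for_error -= 1
--                 break
--         else:
--             return True
--     return False
-- ===== Notes on version B (the rewrite author's own statement) =====
-- stated objective: idiomatic
-- what changed: Replaced A's tail recursion with slice rebuilding and per-index range-membership tests by an iterative while-loop over a working copy that scans zipped triples (zip(cur, cur[1:], cur[2:]) with for-else), deletes the first bad element in place and decrements the margin.
import Mathlib
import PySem

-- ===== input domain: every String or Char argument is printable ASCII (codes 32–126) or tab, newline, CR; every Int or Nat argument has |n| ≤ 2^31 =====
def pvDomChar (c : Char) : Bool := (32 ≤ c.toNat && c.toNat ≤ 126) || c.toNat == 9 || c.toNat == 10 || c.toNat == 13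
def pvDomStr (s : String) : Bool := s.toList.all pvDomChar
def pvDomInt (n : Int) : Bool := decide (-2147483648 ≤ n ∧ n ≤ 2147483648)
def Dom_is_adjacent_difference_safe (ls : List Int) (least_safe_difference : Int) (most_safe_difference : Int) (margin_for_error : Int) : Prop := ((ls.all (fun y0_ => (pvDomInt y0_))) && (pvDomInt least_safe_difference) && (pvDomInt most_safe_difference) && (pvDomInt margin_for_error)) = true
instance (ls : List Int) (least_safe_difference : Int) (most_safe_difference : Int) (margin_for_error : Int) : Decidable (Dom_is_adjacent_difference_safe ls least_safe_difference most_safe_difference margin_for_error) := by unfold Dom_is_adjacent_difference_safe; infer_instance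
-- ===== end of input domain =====

-- B replaces A's recursion-with-index-scan by an iterative removal loop over zipped triples (objective: idiomatic/alternative; same cost).

-- ===== PORT A =====
-- A's for-loop over i in range(1, len(ls)-1) with an early 'return' at the first bad i:
-- ported as a recursion on i returning the first bad index (none = the loop completed).
-- 'fuel = ls.length' bounds the iteration count (it provably suffices; it only makes the
-- recursion structural). The loop guard keeps every index in range, so getD _ 0 is exact.
def pvAFindBad (ls : List Int) (lo hi : Int) (fuel : Nat) (i : Nat) : Option Nat :=
  match fuel with
  | 0 => none
  | fuel + 1 =>
    if i + 1 < ls.length then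
      let dp : Int := ((ls.getD (i-1) 0) - (ls.getD i 0)).natAbs
      let dn : Int := ((ls.getD i 0) - (ls.getD (i+1) 0)).natAbs
      if !(decide (lo ≤ dp ∧ dp < hi + 1) && decide (lo ≤ dn ∧ dn < hi + 1)) then
        some i
      else pvAFindBad ls lo hi fuel (i+1)
    else none

-- A's recursion on the list with margin_for_error - 1; 'fuel = (margin_for_error+1).toNat'
-- bounds the recursion depth (fuel 0 ↔ margin < 0, where A returns False as well).
def pvALoop (least_safe_difference : Int) (most_safe_difference : Int) (fuel : Nat) (ls : List Int) (margin_for_error : Int) : Bool :=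
  match fuel with
  | 0 => false
  | fuel + 1 =>
    if margin_for_error < 0 then false
    else
      match pvAFindBad ls least_safe_difference most_safe_difference ls.length 1 with
      | none => true  -- the for-loop finished: return True
      | some i =>  -- ls[:i] + ls[i+1:], margin - 1
          pvALoop least_safe_difference most_safe_difference fuel (ls.take i ++ ls.drop (i+1)) (margin_for_error - 1)

def is_adjacent_difference_safe (ls : List Int) (least_safe_difference : Int) (most_safe_difference : Int) (margin_for_error : Int) : Bool :=
  pvALoop least_safe_difference most_safe_difference (margin_for_error + 1).toNat ls margin_for_error

-- ===== PORT B =====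
-- zip(cur, cur[1:], cur[2:])
def pvBTriples (cur : List Int) : List (Int × Int × Int) :=
  cur.zip ((cur.drop 1).zip (cur.drop 2))

-- the if-condition of B's inner for-loop (chained comparisons spelled out)
def pvBBad (lo hi : Int) (t : Int × Int × Int) : Bool :=
  !(decide (lo ≤ ((t.1 - t.2.1).natAbs : Int)) && decide (((t.1 - t.2.1).natAbs : Int) ≤ hi)
    && decide (lo ≤ ((t.2.1 - t.2.2).natAbs : Int)) && decide (((t.2.1 - t.2.2).natAbs : Int) ≤ hi))

-- B's while-loop: 'enumerate(..., start=1)' + 'break' picks the first bad triple;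
-- findIdx? gives its 0-based position j, so the deleted index is i = j+1.
-- fuel = (margin+1).toNat bounds the iteration count (each pass decrements margin;
-- fuel 0 ↔ margin < 0, where the while-condition fails and B returns False as well).
def pvBLoop (least_safe_difference : Int) (most_safe_difference : Int) (fuel : Nat) (cur : List Int) (margin : Int) : Bool :=
  match fuel with
  | 0 => false
  | fuel + 1 =>
    if margin < 0 then false  -- while margin >= 0 failed: return False
    else
      match (pvBTriples cur).findIdx? (pvBBad least_safe_difference most_safe_difference) with
      | none => true  -- for-else: return True
      | some j =>  -- del cur[j+1]; margin -= 1
          pvBLoop least_safe_difference most_safe_difference fuel (cur.take (j+1) ++ cur.drop (j+2)) (margin - 1)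

def is_adjacent_difference_safe_alt (ls : List Int) (least_safe_difference : Int) (most_safe_difference : Int) (margin_for_error : Int) : Bool :=
  pvBLoop least_safe_difference most_safe_difference (margin_for_error + 1).toNat ls margin_for_error

-- ===== PRECONDITION & SPEC =====
def Spec_is_adjacent_difference_safe (ls : List Int) (least_safe_difference : Int) (most_safe_difference : Int) (margin_for_error : Int) (out : Bool) : Prop := out = is_adjacent_difference_safe_alt ls least_safe_difference most_safe_difference margin_for_error
instance (ls : List Int) (least_safe_difference : Int) (most_safe_difference : Int) (margin_for_error : Int) (out : Bool) : Decidable (Spec_is_adjacent_difference_safe ls least_safe_difference most_safe_difference margin_for_error out) := by unfold Spec_is_adjacent_difference_safe; infer_instance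

-- ===== CLAIM (what is proved, stated in full; the proofs are below) =====
def Claim_equal_is_adjacent_difference_safe : Prop := ∀ (ls : List Int) (least_safe_difference : Int) (most_safe_difference : Int) (margin_for_error : Int), Dom_is_adjacent_difference_safe ls least_safe_difference most_safe_difference margin_for_error → Spec_is_adjacent_difference_safe ls least_safe_difference most_safe_difference margin_for_error (is_adjacent_difference_safe ls least_safe_difference most_safe_difference margin_for_error)

-- ===== LEMMAS AND PROOFS =====

lemma pvBTriples_length (ls : List Int) : (pvBTriples ls).length = ls.length - 2 := by
  simp [pvBTriples]; omega

lemma pvBTriples_getElem (ls : List Int) (k : Nat) (h : k < (pvBTriples ls).length) :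
    (pvBTriples ls)[k] =
      (ls[k]'(by simp [pvBTriples_length] at h; omega),
       ls[k+1]'(by simp [pvBTriples_length] at h; omega),
       ls[k+2]'(by simp [pvBTriples_length] at h; omega)) := by
  simp [pvBTriples, Nat.add_comm]

-- A's bad-index scan equals findIdx? on the triple list, shifted by the start index.
lemma scan_eq (ls : List Int) (lo hi : Int) :
    ∀ fuel i, 1 ≤ i → ls.length - i ≤ fuel →
      pvAFindBad ls lo hi fuel i =
        (((pvBTriples ls).drop (i-1)).findIdx? (pvBBad lo hi)).map (· + i) := by
  intro fuel
  induction fuel with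
  | zero =>
      intro i h1 h2
      rw [List.drop_eq_nil_of_le (by rw [pvBTriples_length]; omega)]
      simp [pvAFindBad]
  | succ n ih =>
      intro i h1 h2
      obtain ⟨k, rfl⟩ : ∃ k, i = k + 1 := ⟨i - 1, by omega⟩
      rw [pvAFindBad]
      by_cases h : k + 1 + 1 < ls.length
      · rw [if_pos h]
        have hk : k < (pvBTriples ls).length := by rw [pvBTriples_length]; omega
        have hdrop : (pvBTriples ls).drop (k+1-1) = (pvBTriples ls)[k] :: (pvBTriples ls).drop (k+1) := by
          simpa using List.drop_eq_getElem_cons hk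
        rw [hdrop, List.findIdx?_cons, pvBTriples_getElem ls k hk]
        have hg1 : ls.getD (k+1-1) 0 = ls[k]'(by omega) := by
          simpa using List.getD_eq_getElem ls 0 (show k < ls.length by omega)
        have hg2 : ls.getD (k+1) 0 = ls[k+1]'(by omega) := List.getD_eq_getElem _ _ (by omega)
        have hg3 : ls.getD (k+1+1) 0 = ls[k+2]'(by omega) := by
          simpa [Nat.add_assoc] using List.getD_eq_getElem ls 0 (show k+2 < ls.length by omega)
        simp only [hg1, hg2, hg3]
        set a := ls[k]'(by omega)
        set b := ls[k+1]'(by omega)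
        set c := ls[k+2]'(by omega)
        have hbad :
            (!(decide (lo ≤ ((a - b).natAbs : Int) ∧ ((a - b).natAbs : Int) < hi + 1) &&
               decide (lo ≤ ((b - c).natAbs : Int) ∧ ((b - c).natAbs : Int) < hi + 1)))
            = pvBBad lo hi (a, b, c) := by
          simp [pvBBad, Int.lt_add_one_iff, Bool.or_assoc]
        rw [hbad]
        by_cases hb : pvBBad lo hi (a, b, c) = true
        · simp [hb]
        · simp only [Bool.not_eq_true] at hb
          rw [ih (k+1+1) (by omega) (by omega)]
          simp only [hb]
          rw [if_neg Bool.false_ne_true, if_neg Bool.false_ne_true]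
          have e : k + 1 + 1 - 1 = k + 1 := by omega
          rw [e, Option.map_map]
          congr 1
          funext j
          simp [Function.comp]
          omega
      · rw [if_neg h]
        rw [List.drop_eq_nil_of_le (by rw [pvBTriples_length]; omega)]
        simp

-- the two removal loops agree for every fuel
lemma loop_eq (lo hi : Int) :
    ∀ fuel ls m, pvALoop lo hi fuel ls m = pvBLoop lo hi fuel ls m := by
  intro fuel
  induction fuel with
  | zero => intro ls m; rfl
  | succ n ih =>
      intro ls m
      rw [pvALoop, pvBLoop]
      by_cases hm : m < 0
      · rw [if_pos hm, if_pos hm]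
      · rw [if_neg hm, if_neg hm]
        have hscan := scan_eq ls lo hi ls.length 1 (by omega) (by omega)
        simp only [Nat.sub_self, List.drop_zero] at hscan
        rw [hscan]
        cases hfi : ((pvBTriples ls).findIdx? (pvBBad lo hi)) with
        | none => simp
        | some j =>
            simp only [Option.map_some]
            exact ih _ _

-- ===== VERDICT (by name: the statement is the Claim_ definition above) =====
theorem is_adjacent_difference_safe_spec : Claim_equal_is_adjacent_difference_safe := by
  intro ls lo hi m _
  unfold Spec_is_adjacent_difference_safe is_adjacent_difference_safe is_adjacent_difference_safe_alt
  exact loop_eq lo hi _ ls m
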